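-- pv_equiv track=rewrite | github.com/ehjhihlo/LeetCode-practice | 0492. Construct the Rectangle.py | constructRectangle
-- ===== SOURCE A (Python) =====
-- from typing import List
--
-- def constructRectangle(area: int) -> List[int]:
--     W = 1
--     L = area
--     diff = L-W
--     for i in range(1,area+1):
--         if area % i == 0:
--             w = i
--             l = area//i
--             if l>=w and l-w<diff:
--                 W = w
--                 L = l
--                 diff = l-w
--     return [L,W]
-- ===== SOURCE B (Python) =====
-- from typing import List
--
-- def constructRectangle(area: int) -> List[int]:
--     # climb to floor(sqrt(area)), then descend to the first divisor
--     w = 1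
--     while (w + 1) * (w + 1) <= area:
--         w += 1
--     while area % w:
--         w -= 1
--     return [area // w, w]
-- ===== Notes on version B (the rewrite author's own statement) =====
-- stated objective: faster
-- what changed: Replaces A's full scan of every i in 1..area that tracks the best (L,W,diff) triple with a direct search: climb w to floor(sqrt(area)), then step w down to the first divisor, which is the answer.
import Mathlib
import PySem

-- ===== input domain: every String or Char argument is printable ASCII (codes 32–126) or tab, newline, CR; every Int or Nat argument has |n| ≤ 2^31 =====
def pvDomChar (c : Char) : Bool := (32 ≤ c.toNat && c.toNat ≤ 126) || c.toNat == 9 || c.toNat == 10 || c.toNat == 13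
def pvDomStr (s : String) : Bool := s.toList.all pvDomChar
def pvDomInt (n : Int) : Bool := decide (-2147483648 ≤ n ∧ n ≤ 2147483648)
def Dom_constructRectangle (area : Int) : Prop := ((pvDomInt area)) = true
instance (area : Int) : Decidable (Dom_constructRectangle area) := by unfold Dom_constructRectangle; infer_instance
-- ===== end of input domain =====

-- B replaces A's full scan of 1..area with a climb to floor(sqrt(area)) followed by a
-- descent to the first divisor (objective: faster, O(sqrt n) instead of O(n)).

-- ===== PORT A =====
-- loop body of A: state is (W, L, diff)
def pvBodyA (area : Int) (s : Int × Int × Int) (i : Int) : Int × Int × Int :=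
  if PySem.Int.mod area i = 0 then
    let w := i
    let l := PySem.Int.floordiv area i
    if l ≥ w ∧ l - w < s.2.2 then (w, l, l - w) else s
  else s

def constructRectangle (area : Int) : List Int :=
  let st := (PySem.List.pyRange 1 (area + 1) 1).foldl (pvBodyA area) (1, area, area - 1)
  [st.2.1, st.1]

-- ===== PORT B =====
-- while (w+1)*(w+1) <= area: w += 1   ('0 ≤ w' is a totality guard only; every actual call has w = 1 ≤ climbed w)
def pvClimb (area w : Int) : Int :=
  if 0 ≤ w ∧ (w + 1) * (w + 1) ≤ area then pvClimb area (w + 1) else w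
termination_by (area - w).toNat
decreasing_by
  rename_i h
  have : w + 1 ≤ area := by nlinarith [h.1, h.2]
  omega

-- while area % w: w -= 1   ('1 ≤ w' is a totality guard only; the Python loop never leaves w = 1 since area % 1 == 0)
def pvDescend (area w : Int) : Int :=
  if 1 ≤ w ∧ PySem.Int.mod area w ≠ 0 then pvDescend area (w - 1) else w
termination_by w.toNat
decreasing_by
  rename_i h
  omega

def constructRectangle_alt (area : Int) : List Int :=
  let w := pvDescend area (pvClimb area 1)
  [PySem.Int.floordiv area w, w]

-- ===== PRECONDITION & SPEC =====
def Spec_constructRectangle (area : Int) (out : List Int) : Prop := out = constructRectangle_alt area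
instance (area : Int) (out : List Int) : Decidable (Spec_constructRectangle area out) := by unfold Spec_constructRectangle; infer_instance

-- ===== CLAIM (what is proved, stated in full; the proofs are below) =====
def Claim_equal_constructRectangle : Prop := ∀ (area : Int), Dom_constructRectangle area → Spec_constructRectangle area (constructRectangle area)

-- ===== LEMMAS AND PROOFS =====

-- for a positive divisor j of n:  n // j ≥ j  ↔  j*j ≤ n
theorem pvQuot_ge_iff (n j : Int) (hj : 1 ≤ j) (hd : j ∣ n) :
    j ≤ PySem.Int.floordiv n j ↔ j * j ≤ n := by
  have hm : PySem.Int.mod n j = 0 := (PySem.Int.mod_eq_zero_iff_dvd n j).mpr hd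
  have hq := PySem.Int.floordiv_mul_add_mod n j
  rw [hm] at hq
  constructor
  · intro h; nlinarith
  · intro h; nlinarith

-- A's loop invariant: after processing 1..k (k ≥ 1), the state is (w, n//w, n//w - w)
-- where w is the largest divisor of n in [1,k] whose square is at most n.
theorem pvLoopA (n : Int) (hn : 1 ≤ n) : ∀ k : Int, 1 ≤ k →
    ∃ w : Int,
      (PySem.List.pyRange 1 (k + 1) 1).foldl (pvBodyA n) (1, n, n - 1)
        = (w, PySem.Int.floordiv n w, PySem.Int.floordiv n w - w)
      ∧ 1 ≤ w ∧ w ≤ k ∧ w ∣ n ∧ w * w ≤ n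
      ∧ ∀ j, w < j → j ≤ k → j ∣ n → ¬ (j * j ≤ n) := by
  intro k hk
  induction k, hk using Int.le_induction with
  | base =>
    refine ⟨1, ?_, le_refl 1, le_refl 1, one_dvd n, by nlinarith, ?_⟩
    · have h1 : PySem.List.pyRange 1 2 1 = [(1 : Int)] := by
        have := PySem.List.pyRange_one_singleton (1 : Int); norm_num at this; exact this
      rw [PySem.List.pyRange_one_singleton]
      simp [List.foldl, pvBodyA]
    · intro j h1 h2; omega
  | succ k hk ih =>
    obtain ⟨w, hst, hw1, hwk, hwd, hwsq, hmax⟩ := ih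
    have hsplit : PySem.List.pyRange 1 (k + 1 + 1) 1
        = PySem.List.pyRange 1 (k + 1) 1 ++ [k + 1] :=
      PySem.List.pyRange_one_succ_right (by omega)
    rw [hsplit, List.foldl_append, hst]
    by_cases hdv : PySem.Int.mod n (k + 1) = 0
    · have hdvd : (k + 1) ∣ n := (PySem.Int.mod_eq_zero_iff_dvd n (k + 1)).mp hdv
      by_cases hsq : (k + 1) * (k + 1) ≤ n
      · -- new best candidate
        have hge : (k + 1) ≤ PySem.Int.floordiv n (k + 1) :=
          (pvQuot_ge_iff n (k + 1) (by omega) hdvd).mpr hsq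
        -- strict improvement of the diff
        have hqw : PySem.Int.floordiv n w * w = n := by
          have hm : PySem.Int.mod n w = 0 := (PySem.Int.mod_eq_zero_iff_dvd n w).mpr hwd
          have := PySem.Int.floordiv_mul_add_mod n w
          rw [hm] at this; omega
        have hqk : PySem.Int.floordiv n (k + 1) * (k + 1) = n := by
          have := PySem.Int.floordiv_mul_add_mod n (k + 1)
          rw [hdv] at this; omega
        have hlq : PySem.Int.floordiv n (k + 1) ≤ PySem.Int.floordiv n w := by
          nlinarith [hge, hwk, hw1]
        have hlt : PySem.Int.floordiv n (k + 1) - (k + 1)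
            < PySem.Int.floordiv n w - w := by omega
        refine ⟨k + 1, ?_, by omega, le_refl _, hdvd, hsq, ?_⟩
        · simp only [List.foldl_cons, List.foldl_nil]
          simp only [pvBodyA]
          rw [if_pos hdv]
          split_ifs with hc
          · rfl
          · exact absurd ⟨hge, hlt⟩ hc
        · intro j h1 h2; omega
      · -- the candidate k+1 fails l ≥ w
        have hlt : PySem.Int.floordiv n (k + 1) < k + 1 := by
          by_contra hc
          exact hsq ((pvQuot_ge_iff n (k + 1) (by omega) hdvd).mp (by omega))
        refine ⟨w, ?_, hw1, by omega, hwd, hwsq, ?_⟩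
        · simp only [List.foldl_cons, List.foldl_nil]
          simp only [pvBodyA]
          rw [if_pos hdv]
          split_ifs with hc
          · exact absurd hc.1 (by omega)
          · rfl
        · intro j h1 h2 h3
          rcases lt_or_ge j (k + 1) with h | h
          · exact hmax j h1 (by omega) h3
          · have hj : j = k + 1 := by omega
            rw [hj]; exact hsq
    · -- k+1 does not divide n: state unchanged
      refine ⟨w, ?_, hw1, by omega, hwd, hwsq, ?_⟩
      · simp [pvBodyA, hdv]
      · intro j h1 h2 h3
        rcases lt_or_ge j (k + 1) with h | h
        · exact hmax j h1 (by omega) h3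
        · have hj : j = k + 1 := by omega
          rw [hj] at h3
          exact absurd ((PySem.Int.mod_eq_zero_iff_dvd n (k + 1)).mpr h3) hdv

-- pvClimb returns the integer square root when started below it
theorem pvClimb_spec (n w : Int) : 0 ≤ w → w * w ≤ n →
    w ≤ pvClimb n w ∧ (pvClimb n w) * (pvClimb n w) ≤ n
      ∧ n < (pvClimb n w + 1) * (pvClimb n w + 1) ∧ 0 ≤ pvClimb n w := by
  fun_induction pvClimb n w with
  | case1 w hg ih =>
    intro h0 h1
    have := ih (by omega) hg.2
    exact ⟨by omega, this.2.1, this.2.2.1, this.2.2.2⟩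
  | case2 w hg =>
    intro h0 h1
    refine ⟨le_refl w, h1, ?_, h0⟩
    rcases not_and_or.mp hg with h | h <;> omega

-- pvDescend returns the largest divisor ≤ w (for w ≥ 1)
theorem pvDescend_spec (n w : Int) : 1 ≤ w →
    1 ≤ pvDescend n w ∧ pvDescend n w ≤ w ∧ PySem.Int.mod n (pvDescend n w) = 0
      ∧ ∀ j, pvDescend n w < j → j ≤ w → PySem.Int.mod n j ≠ 0 := by
  fun_induction pvDescend n w with
  | case1 w hg ih =>
    intro h1
    have hw2 : 2 ≤ w := by
      by_contra hc
      have hw1 : w = 1 := by omega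
      have : PySem.Int.mod n 1 = 0 := (PySem.Int.mod_eq_zero_iff_dvd n 1).mpr (one_dvd n)
      exact hg.2 (hw1 ▸ this)
    have ihs := ih (by omega)
    refine ⟨ihs.1, by omega, ihs.2.2.1, ?_⟩
    intro j hj1 hj2
    rcases lt_or_ge j w with h | h
    · exact ihs.2.2.2 j hj1 (by omega)
    · have : j = w := by omega
      subst this; exact hg.2
  | case2 w hg =>
    intro h1
    have hm : PySem.Int.mod n w = 0 := by
      rcases not_and_or.mp hg with h | h
      · omega
      · simpa using h
    exact ⟨h1, le_refl w, hm, fun j hj1 hj2 => by omega⟩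

-- ===== VERDICT (by name: the statement is the Claim_ definition above) =====
theorem constructRectangle_spec : Claim_equal_constructRectangle := by
  intro area _
  unfold Spec_constructRectangle constructRectangle constructRectangle_alt
  rcases lt_or_ge area 1 with hle | hpos
  · -- area ≤ 0: A's loop is empty, B never moves off w = 1
    have hr : PySem.List.pyRange 1 (area + 1) 1 = [] :=
      PySem.List.pyRange_one_eq_nil (by omega)
    have hc : pvClimb area 1 = 1 := by
      rw [pvClimb, if_neg (by omega : ¬((0:Int) ≤ 1 ∧ (1 + 1) * (1 + 1) ≤ area))]
    have hm1 : PySem.Int.mod area 1 = 0 := (PySem.Int.mod_eq_zero_iff_dvd area 1).mpr (one_dvd area)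
    have hd : pvDescend area 1 = 1 := by
      rw [pvDescend, if_neg (by rw [hm1]; simp : ¬((1:Int) ≤ 1 ∧ PySem.Int.mod area 1 ≠ 0))]
    simp [hr, hc, hd]
  · -- area ≥ 1
    have hn : 1 ≤ area := hpos
    obtain ⟨w, hst, hw1, hwk, hwd, hwsq, hmax⟩ := pvLoopA area hn area hn
    have hcl := pvClimb_spec area 1 (by omega) (by nlinarith)
    set r := pvClimb area 1 with hrdef
    have hr1 : 1 ≤ r := hcl.1
    have hde := pvDescend_spec area r hr1
    set d := pvDescend area r with hddef
    have hd1 : 1 ≤ d := hde.1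
    have hddvd : d ∣ area := (PySem.Int.mod_eq_zero_iff_dvd area d).mp hde.2.2.1
    have hdsq : d * d ≤ area := by nlinarith [hde.2.1, hcl.2.1, hd1, hr1]
    -- w ≤ r since w*w ≤ area < (r+1)*(r+1)
    have hwr : w ≤ r := by nlinarith [hcl.2.2.1, hwsq, hw1, hcl.2.2.2]
    have hdn : d ≤ area := by nlinarith [hde.2.1, hcl.2.1, hd1, hr1]
    have hdw : d = w := by
      rcases lt_trichotomy d w with h | h | h
      · exact absurd ((PySem.Int.mod_eq_zero_iff_dvd area w).mpr hwd)
          (hde.2.2.2 w h hwr)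
      · exact h
      · exact absurd hdsq (hmax d h hdn hddvd)
    rw [hst]
    simp [hdw]
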